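-- pv_equiv track=rewrite | github.com/m-franc/kata | python/domino_reaction.py | domino_reaction
-- ===== SOURCE A (Python) =====
-- def domino_reaction(s):
--     falling = 1
--     s_copy = ""
--     for domino in s:
--         if domino == '|' and falling == 1:
--             s_copy += '/'
--         elif domino == ' ' or domino == '/':
--             falling = 0
--             s_copy += domino
--         else:
--             s_copy += domino
--     return s_copy
-- ===== SOURCE B (Python) =====
-- def domino_reaction(s):
--     idx = next((i for i, c in enumerate(s) if c in ' /'), len(s))
--     return s[:idx].replace('|', '/') + s[idx:]
-- ===== Notes on version B (the rewrite author's own statement) =====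
-- stated objective: simpler
-- what changed: Replaces A's character-by-character loop with a falling flag by finding the first gap character (' ' or '/') and doing one bulk replace of '|' on the prefix plus a verbatim suffix copy.
import Mathlib
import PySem

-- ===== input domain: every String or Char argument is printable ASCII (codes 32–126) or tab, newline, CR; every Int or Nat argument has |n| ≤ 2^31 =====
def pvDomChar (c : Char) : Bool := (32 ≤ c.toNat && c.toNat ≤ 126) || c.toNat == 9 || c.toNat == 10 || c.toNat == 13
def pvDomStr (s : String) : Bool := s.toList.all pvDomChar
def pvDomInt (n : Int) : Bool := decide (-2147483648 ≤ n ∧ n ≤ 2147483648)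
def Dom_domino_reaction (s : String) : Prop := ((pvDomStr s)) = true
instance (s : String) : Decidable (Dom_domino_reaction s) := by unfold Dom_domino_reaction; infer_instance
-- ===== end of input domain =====

-- B replaces A's per-character loop with a falling flag by a find-first-gap + bulk prefix replace; objective: simpler.

-- ===== PORT A =====
-- A's loop: state (falling : Int, s_copy), one step per character, branches in A's order.
def domino_reaction (s : String) : String :=
  let r := s.toList.foldl (fun (st : Int × List Char) domino =>
    if domino = '|' ∧ st.1 = 1 then (st.1, st.2 ++ ['/'])
    else if domino = ' ' ∨ domino = '/' then ((0 : Int), st.2 ++ [domino])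
    else (st.1, st.2 ++ [domino])) ((1 : Int), [])
  String.ofList r.2

-- ===== PORT B =====
-- index of the first ' ' or '/' (len if none) — port of B's next(... enumerate ...)
def gapIdx : List Char → Nat
  | [] => 0
  | c :: rest => if c = ' ' ∨ c = '/' then 0 else gapIdx rest + 1

def domino_reaction_alt (s : String) : String :=
  let l := s.toList
  let idx := gapIdx l
  -- s[:idx].replace('|','/') + s[idx:]
  String.ofList ((l.take idx).map (fun c => if c = '|' then '/' else c) ++ l.drop idx)

-- ===== PRECONDITION & SPEC =====
def Spec_domino_reaction (s : String) (out : String) : Prop := out = domino_reaction_alt s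
instance (s : String) (out : String) : Decidable (Spec_domino_reaction s out) := by unfold Spec_domino_reaction; infer_instance

-- ===== CLAIM (what is proved, stated in full; the proofs are below) =====
def Claim_equal_domino_reaction : Prop := ∀ (s : String), Dom_domino_reaction s → Spec_domino_reaction s (domino_reaction s)

-- ===== LEMMAS AND PROOFS =====
-- abbreviation for A's step function (proof-side only)
def dstep : Int × List Char → Char → Int × List Char := fun st domino =>
  if domino = '|' ∧ st.1 = 1 then (st.1, st.2 ++ ['/'])
  else if domino = ' ' ∨ domino = '/' then ((0 : Int), st.2 ++ [domino])
  else (st.1, st.2 ++ [domino])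

lemma dfold_zero (l : List Char) (acc : List Char) :
    l.foldl dstep (0, acc) = (0, acc ++ l) := by
  induction l generalizing acc with
  | nil => simp
  | cons c rest ih =>
    have h1 : dstep (0, acc) c = (0, acc ++ [c]) := by
      simp only [dstep]; split_ifs with h1 h2 <;> simp_all
    rw [List.foldl_cons, h1, ih]
    simp

lemma dfold_one (l : List Char) (acc : List Char) :
    (l.foldl dstep (1, acc)).2 =
      acc ++ ((l.take (gapIdx l)).map (fun c => if c = '|' then '/' else c) ++ l.drop (gapIdx l)) := by
  induction l generalizing acc with
  | nil => simp
  | cons c rest ih =>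
    rw [List.foldl_cons]
    by_cases hg : c = ' ' ∨ c = '/'
    · have h1 : dstep (1, acc) c = (0, acc ++ [c]) := by
        rcases hg with h | h <;> subst h <;> rfl
      rw [h1, dfold_zero]
      simp [gapIdx, hg]
    · by_cases hp : c = '|'
      · have h1 : dstep (1, acc) c = (1, acc ++ ['/']) := by subst hp; rfl
        rw [h1, ih]
        simp [gapIdx, hg, hp]
      · have h1 : dstep (1, acc) c = (1, acc ++ [c]) := by
          simp [dstep, hp, hg]
        rw [h1, ih]
        simp [gapIdx, hg, hp]

-- ===== VERDICT (by name: the statement is the Claim_ definition above) =====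
theorem domino_reaction_spec : Claim_equal_domino_reaction := by
  intro s _
  show _ = _
  unfold domino_reaction domino_reaction_alt
  have := dfold_one s.toList []
  simp only [List.nil_append] at this
  simp only [show (fun (st : Int × List Char) (domino : Char) =>
    if domino = '|' ∧ st.1 = 1 then (st.1, st.2 ++ ['/'])
    else if domino = ' ' ∨ domino = '/' then ((0 : Int), st.2 ++ [domino])
    else (st.1, st.2 ++ [domino])) = dstep from rfl]
  rw [this]
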